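-- pv_equiv track=rewrite | github.com/NuGuardAI/nuguard | nuguard/common/auto_sbom_enricher.py | _infer_field_from_loc
-- ===== SOURCE A (Python) =====
-- from typing import Any, Iterable
--
-- _LOC_IGNORED_TOKENS = {
--     "body",
--     "query",
--     "path",
--     "header",
--     "headers",
--     "cookie",
--     "cookies",
--     "json",
-- }
--
-- def _infer_field_from_loc(loc: Any) -> str | None:
--     if not isinstance(loc, (list, tuple)):
--         return None
--
--     # FastAPI/Pydantic commonly reports loc like ["body", "user_query"].
--     for token in reversed(loc):
--         if not isinstance(token, str):
--             continue
--         candidate = token.strip()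
--         if not candidate:
--             continue
--         if candidate.lower() in _LOC_IGNORED_TOKENS:
--             continue
--         return candidate
--
--     return None
-- ===== SOURCE B (Python) =====
-- _LOC_IGNORED_TOKENS = {
--     "body","query","path","header","headers","cookie","cookies","json",
-- }
--
-- def _infer_field_from_loc(loc):
--     if not isinstance(loc, (list, tuple)):
--         return None
--     candidates = [
--         c
--         for token in loc
--         if isinstance(token, str)
--         and (c := token.strip())
--         and c.lower() not in _LOC_IGNORED_TOKENS
--     ]
--     return candidates[-1] if candidates else None
-- ===== Notes on version B (the rewrite author's own statement) =====
-- stated objective: simpler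
-- what changed: Replaces the reversed short-circuit scan with one forward comprehension that materialises all acceptable stripped tokens and returns the last one.
import Mathlib
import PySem

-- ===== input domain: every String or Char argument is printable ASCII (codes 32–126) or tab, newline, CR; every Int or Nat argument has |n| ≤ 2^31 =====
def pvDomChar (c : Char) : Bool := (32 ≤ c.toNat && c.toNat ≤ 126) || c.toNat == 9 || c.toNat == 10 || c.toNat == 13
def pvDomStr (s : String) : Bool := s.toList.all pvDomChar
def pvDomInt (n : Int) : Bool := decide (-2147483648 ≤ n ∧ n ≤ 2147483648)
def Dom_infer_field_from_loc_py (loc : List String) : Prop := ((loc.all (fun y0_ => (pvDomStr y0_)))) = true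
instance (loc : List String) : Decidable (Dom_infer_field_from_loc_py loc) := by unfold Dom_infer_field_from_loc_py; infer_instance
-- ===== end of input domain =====

-- B replaces A's reversed short-circuit scan by a forward filterMap pass that materialises all acceptable stripped tokens and returns the last; objective: simpler.


-- module-level constant _LOC_IGNORED_TOKENS (a Python set of distinct string literals)
def locIgnoredTokens : List String :=
  ["body", "query", "path", "header", "headers", "cookie", "cookies", "json"]

-- ===== PORT A =====
-- A's `for token in reversed(loc)` loop with continue/return, as structural recursion
def inferGoA : List String → Option String
  | [] => none
  | token :: rest =>
    let candidate := PySem.Str.strip token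
    if candidate = "" then inferGoA rest
    else if PySem.Str.lower candidate ∈ locIgnoredTokens then inferGoA rest
    else some candidate

def infer_field_from_loc_py (loc : List String) : Option String :=
  inferGoA loc.reverse

-- ===== PORT B =====
def infer_field_from_loc_py_alt (loc : List String) : Option String :=
  let candidates := loc.filterMap (fun token =>
    let c := PySem.Str.strip token
    if c = "" then none
    else if PySem.Str.lower c ∈ locIgnoredTokens then none
    else some c)
  if candidates.isEmpty then none else candidates.getLast?

-- ===== PRECONDITION & SPEC =====
def Spec_infer_field_from_loc_py (loc : List String) (out : Option String) : Prop := out = infer_field_from_loc_py_alt loc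
instance (loc : List String) (out : Option String) : Decidable (Spec_infer_field_from_loc_py loc out) := by unfold Spec_infer_field_from_loc_py; infer_instance

-- ===== CLAIM (what is proved, stated in full; the proofs are below) =====
def Claim_equal_infer_field_from_loc_py : Prop := ∀ (loc : List String), Dom_infer_field_from_loc_py loc → Spec_infer_field_from_loc_py loc (infer_field_from_loc_py loc)

-- ===== LEMMAS AND PROOFS =====

-- B's filter function, named for the proofs
def pvF (token : String) : Option String :=
  let c := PySem.Str.strip token
  if c = "" then none
  else if PySem.Str.lower c ∈ locIgnoredTokens then none
  else some c

-- A's scan returns the first accepted token of its argument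
theorem inferGoA_eq_head? (l : List String) : inferGoA l = (l.filterMap pvF).head? := by
  induction l with
  | nil => rfl
  | cons t rest ih =>
    simp only [inferGoA, List.filterMap_cons, pvF]
    split_ifs <;> simp [pvF, *, ih]

-- ===== VERDICT (by name: the statement is the Claim_ definition above) =====
theorem infer_field_from_loc_py_spec : Claim_equal_infer_field_from_loc_py := by
  intro loc _
  show infer_field_from_loc_py loc = infer_field_from_loc_py_alt loc
  unfold infer_field_from_loc_py infer_field_from_loc_py_alt
  rw [inferGoA_eq_head?]
  have hf : (fun token => pvF token) =
      (fun token : String =>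
        let c := PySem.Str.strip token
        if c = "" then none
        else if PySem.Str.lower c ∈ locIgnoredTokens then none
        else some c) := rfl
  rw [← hf, List.filterMap_reverse, List.head?_reverse]
  cases h : (loc.filterMap pvF) with
  | nil => simp
  | cons a l => simp
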